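-- pv_equiv track=rewrite | github.com/ishikota/pypoker | script/data_processor.py | devideDataByGame
-- ===== SOURCE A (Python) =====
-- def devideDataByGame(data):
--   N = len(data)
--   memo_index = 0
--   memo = [[]]
--   cp = 0
--   while cp < N:
--     if data[cp] == '\r\n':  # Each game data is devided by 3 blank line.
--       memo_index += 1
--       memo.append([])
--       while cp+1 < N and data[cp+1] == '\r\n':
--         cp += 1
--     else:
--       memo[memo_index].append(data[cp])
--     cp += 1
--   memo.remove([])
--   return memo
-- ===== SOURCE B (Python) =====
-- def devideDataByGame(data):
--   groups = [[]]
--   prev_blank = False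
--   for line in data:
--     blank = (line == '\r\n')
--     if blank and not prev_blank:
--       groups.append([])
--     elif not blank:
--       groups[-1].append(line)
--     prev_blank = blank
--   groups.remove([])
--   return groups
-- ===== Notes on version B (the rewrite author's own statement) =====
-- stated objective: simpler
-- what changed: Replaced A's index cursor with inner skip-while loop and a maintained memo_index by a single for-loop over the lines carrying a previous-line-was-blank flag (a groupby-style run collapse), appending to the last group directly.
import Mathlib
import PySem

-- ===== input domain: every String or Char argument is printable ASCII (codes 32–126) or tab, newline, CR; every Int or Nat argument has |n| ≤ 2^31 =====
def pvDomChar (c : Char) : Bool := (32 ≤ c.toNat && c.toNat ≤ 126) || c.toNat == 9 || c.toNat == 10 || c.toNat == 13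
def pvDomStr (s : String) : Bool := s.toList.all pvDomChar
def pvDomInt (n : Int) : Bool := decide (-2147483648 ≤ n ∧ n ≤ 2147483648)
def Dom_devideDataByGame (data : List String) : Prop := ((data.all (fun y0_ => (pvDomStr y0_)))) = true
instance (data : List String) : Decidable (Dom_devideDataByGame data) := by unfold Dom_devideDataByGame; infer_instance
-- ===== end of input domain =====

-- B replaces A's cursor/inner-skip-while structure by one for-loop with a previous-line-blank flag; equivalence is about the return value (A raises ValueError when no group ends up empty; B raises there too — excluded by Pre_).

-- ===== PORT A =====
-- inner `while cp+1 < N and data[cp+1] == '\r\n': cp += 1`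
def skipBlanksA (data : List String) (N cp : Nat) : Nat :=
  if _h : cp + 1 < N ∧ data.getD (cp+1) "" = "\r\n" then
    skipBlanksA data N (cp+1)
  else cp
termination_by N - cp
decreasing_by omega

theorem skipBlanksA_ge (data : List String) (N cp : Nat) : cp ≤ skipBlanksA data N cp := by
  fun_induction skipBlanksA data N cp with
  | case1 _ _ ih => omega
  | case2 => omega

-- outer `while cp < N`
def loopA (data : List String) (N cp memoIndex : Nat) (memo : List (List String)) :
    List (List String) :=
  if _h : cp < N then
    if data.getD cp "" = "\r\n" then
      loopA data N (skipBlanksA data N cp + 1) (memoIndex + 1) (memo ++ [[]])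
    else
      loopA data N (cp + 1) memoIndex (memo.modify memoIndex (· ++ [data.getD cp ""]))
  else memo
termination_by N - cp
decreasing_by
  · have := skipBlanksA_ge data N cp; omega
  · omega

def devideDataByGame (data : List String) : List (List String) :=
  let memo := loopA data data.length 0 0 [[]]
  match PySem.List.remove? memo ([] : List String) with
  | some m => m
  | none => []   -- Python raises ValueError here; excluded by Pre_

-- ===== PORT B =====
def stepB (st : List (List String) × Bool) (line : String) : List (List String) × Bool :=
  let blank := line == "\r\n"
  if blank && !st.2 then (st.1 ++ [[]], blank)
  else if !blank then (st.1.modify (st.1.length - 1) (· ++ [line]), blank)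
  else (st.1, blank)

def devideDataByGame_alt (data : List String) : List (List String) :=
  let st := data.foldl stepB ([[]], false)
  match PySem.List.remove? st.1 ([] : List String) with
  | some m => m
  | none => []   -- groups.remove([]) raises ValueError here; excluded by Pre_

-- ===== PRECONDITION & SPEC =====
-- Pre_ excludes exactly the inputs on which A's memo.remove([]) raises ValueError (no empty
-- group: data nonempty with neither a leading nor a trailing blank line); B raises there too.
def Pre_devideDataByGame (data : List String) : Prop :=
  data = [] ∨ data.headD "" = "\r\n" ∨ data.getLast? = some "\r\n"
instance (data : List String) : Decidable (Pre_devideDataByGame data) := by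
  unfold Pre_devideDataByGame; infer_instance

def pvWitness_devideDataByGame : List String := ["a", "\r\n"]

def Spec_devideDataByGame (data : List String) (out : List (List String)) : Prop := out = devideDataByGame_alt data
instance (data : List String) (out : List (List String)) : Decidable (Spec_devideDataByGame data out) := by unfold Spec_devideDataByGame; infer_instance

-- ===== CLAIM (what is proved, stated in full; the proofs are below) =====
def Claim_equal_devideDataByGame : Prop := ∀ (data : List String), Dom_devideDataByGame data → Pre_devideDataByGame data → Spec_devideDataByGame data (devideDataByGame data)

-- ===== LEMMAS AND PROOFS =====

-- common reference shape: structural recursion over the remaining lines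
def specLoop : List String → List (List String) → List (List String)
  | [], memo => memo
  | l :: rest, memo =>
    if l = "\r\n" then
      specLoop (rest.dropWhile (fun s => s == "\r\n")) (memo ++ [[]])
    else
      specLoop rest (memo.modify (memo.length - 1) (· ++ [l]))
termination_by xs _ => xs.length
decreasing_by
  · have := List.length_dropWhile_le (fun s => s == "\r\n") rest; simp; omega
  · simp

theorem skipA_drop (data : List String) (N cp : Nat) (hN : N = data.length) :
    data.drop (skipBlanksA data N cp + 1) =
      (data.drop (cp+1)).dropWhile (fun s => s == "\r\n") := by
  fun_induction skipBlanksA data N cp with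
  | case1 cp h ih =>
    obtain ⟨hlt, hbl⟩ := h
    rw [List.drop_eq_getElem_cons (by omega : cp + 1 < data.length)]
    rw [List.getD_eq_getElem data "" (by omega : cp + 1 < data.length)] at hbl
    rw [List.dropWhile_cons_of_pos (by simp [hbl])]
    exact ih
  | case2 cp h =>
    by_cases hlt : cp + 1 < data.length
    · have hbl : ¬ data.getD (cp+1) "" = "\r\n" := fun hb => h ⟨by omega, hb⟩
      rw [List.getD_eq_getElem data "" hlt] at hbl
      rw [List.drop_eq_getElem_cons hlt, List.dropWhile_cons_of_neg (by simp [hbl])]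
    · rw [List.drop_eq_nil_of_le (by omega)]
      simp

theorem loopA_spec (data : List String) :
    ∀ (k cp mi : Nat) (memo : List (List String)), data.length - cp ≤ k →
      mi + 1 = memo.length →
      loopA data data.length cp mi memo = specLoop (data.drop cp) memo := by
  intro k
  induction k with
  | zero =>
    intro cp mi memo hk hmi
    rw [loopA, dif_neg (by omega), List.drop_eq_nil_of_le (by omega), specLoop]
  | succ k ih =>
    intro cp mi memo hk hmi
    rw [loopA]
    by_cases hcp : cp < data.length
    · rw [dif_pos hcp]
      conv_rhs => rw [List.drop_eq_getElem_cons hcp]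
      rw [List.getD_eq_getElem data "" hcp]
      by_cases hbl : data[cp] = "\r\n"
      · rw [if_pos hbl, specLoop, if_pos hbl, ← skipA_drop data data.length cp rfl]
        have hge := skipBlanksA_ge data data.length cp
        exact ih (skipBlanksA data data.length cp + 1) (mi+1) (memo ++ [[]])
          (by omega) (by simp [← hmi])
      · rw [if_neg hbl, specLoop, if_neg hbl]
        have hmi' : mi = memo.length - 1 := by omega
        rw [← hmi']
        exact ih (cp+1) mi _ (by omega) (by simpa using hmi)
    · rw [dif_neg hcp, List.drop_eq_nil_of_le (by omega), specLoop]

theorem foldB_true (xs : List String) (g : List (List String)) :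
    (xs.foldl stepB (g, true)).1 =
      ((xs.dropWhile (fun s => s == "\r\n")).foldl stepB (g, false)).1 := by
  induction xs generalizing g with
  | nil => simp
  | cons l rest ih =>
    by_cases hbl : l = "\r\n"
    · rw [List.dropWhile_cons_of_pos (by simp [hbl]), List.foldl_cons]
      have hstep : stepB (g, true) l = (g, true) := by simp [stepB, hbl]
      rw [hstep]; exact ih g
    · rw [List.dropWhile_cons_of_neg (by simp [hbl]), List.foldl_cons, List.foldl_cons]
      have hstep : stepB (g, true) l = stepB (g, false) l := by simp [stepB, hbl]
      rw [hstep]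

theorem foldB_spec :
    ∀ (k : Nat) (xs : List String) (g : List (List String)), xs.length ≤ k →
      (xs.foldl stepB (g, false)).1 = specLoop xs g := by
  intro k
  induction k with
  | zero =>
    intro xs g hk
    have : xs = [] := List.eq_nil_of_length_eq_zero (by omega)
    subst this; simp [specLoop]
  | succ k ih =>
    intro xs g hk
    match xs with
    | [] => simp [specLoop]
    | l :: rest =>
      rw [List.foldl_cons]
      by_cases hbl : l = "\r\n"
      · have hstep : stepB (g, false) l = (g ++ [[]], true) := by simp [stepB, hbl]
        rw [hstep, specLoop, if_pos hbl, foldB_true]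
        have hlen := List.length_dropWhile_le (fun s => s == "\r\n") rest
        exact ih _ _ (by simp at hk; omega)
      · have hstep : stepB (g, false) l = (g.modify (g.length - 1) (· ++ [l]), false) := by
          simp [stepB, hbl]
        rw [hstep, specLoop, if_neg hbl]
        exact ih _ _ (by simp at hk; omega)

theorem memo_eq (data : List String) :
    loopA data data.length 0 0 [[]] = (data.foldl stepB ([[]], false)).1 := by
  rw [loopA_spec data data.length 0 0 [[]] (by omega) (by simp),
      ← foldB_spec data.length (data.drop 0) [[]] (by simp)]
  simp

-- ===== VERDICT (by name: the statement is the Claim_ definition above) =====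
theorem devideDataByGame_spec : Claim_equal_devideDataByGame := by
  intro data _ _
  unfold Spec_devideDataByGame devideDataByGame devideDataByGame_alt
  rw [memo_eq]
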